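-- pv_equiv track=rewrite | github.com/hashcloak/Meson | plugin/ops/utils.py | generate_service
-- ===== SOURCE A (Python) =====
-- from typing import List
--
-- def generate_service(
--     name: str,
--     image: str,
--     ports: List[str] = [],
--     volumes: List[str] = [],
--     dependsOn: List[str] = [],
-- ) -> str:
--     """
--     Creates a string with docker compose service specification.
--     Arguments are a list of values that need to be added to each section
--     named after the parameter. i.e. the volume arguments are for the
--     volumes section of the service config.
--     """
--     indent = '  '
--     service = "{s}{name}:\n{s}{s}image: {image}\n".format(
--         s=indent,
--         name=name,
--         image=image,
--     )
--
--     if ports: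
--         service += "{s}ports:\n".format(s=indent*2)
--         for port in ports:
--             service += '{s}- "{port}"\n'.format(s=indent*3, port=port)
--
--     if volumes:
--         service += "{s}volumes:\n".format(s=indent*2)
--         for vol in volumes:
--             service += '{s}- {vol}\n'.format(s=indent*3, vol=vol)
--
--     if dependsOn:
--         service += "{s}depends_on:\n".format(s=indent*2)
--         for item in dependsOn:
--             service += '{s}- "{dep}"\n'.format(s=indent*3, dep=item)
--
--     return service
-- ===== SOURCE B (Python) =====
-- from typing import List
--
-- def generate_service(
--     name: str,
--     image: str,
--     ports: List[str] = [],
--     volumes: List[str] = [],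
--     dependsOn: List[str] = [],
-- ) -> str:
--     """Build a structured document first, then serialize it with a tiny
--     generic recursive YAML emitter (data-first instead of string += blocks)."""
--     doc = {name: {
--         "image": image,
--         "ports": ['"%s"' % p for p in ports],
--         "volumes": list(volumes),
--         "depends_on": ['"%s"' % d for d in dependsOn],
--     }}
--     return _emit(doc, 1)
--
-- def _emit(mapping, depth):
--     """Generic emitter: str value -> 'key: val'; dict -> 'key:' + recurse;
--     list -> 'key:' + '- item' lines (omitted when empty)."""
--     pad = '  ' * depth
--     out = []
--     for key, val in mapping.items():
--         if isinstance(val, str):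
--             out.append(pad + key + ': ' + val + '\n')
--         elif isinstance(val, dict):
--             out.append(pad + key + ':\n')
--             out.append(_emit(val, depth + 1))
--         elif val:
--             out.append(pad + key + ':\n')
--             out.extend(pad + '  - ' + item + '\n' for item in val)
--     return ''.join(out)
-- ===== Notes on version B (the rewrite author's own statement) =====
-- stated objective: alternative
-- what changed: B first builds a structured document (a nested dict with pre-quoted list items) and then serializes it with a small generic recursive YAML emitter that collects lines and ''.joins them, instead of A's flat string += with three hand-unrolled if/for blocks.
import Mathlib
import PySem

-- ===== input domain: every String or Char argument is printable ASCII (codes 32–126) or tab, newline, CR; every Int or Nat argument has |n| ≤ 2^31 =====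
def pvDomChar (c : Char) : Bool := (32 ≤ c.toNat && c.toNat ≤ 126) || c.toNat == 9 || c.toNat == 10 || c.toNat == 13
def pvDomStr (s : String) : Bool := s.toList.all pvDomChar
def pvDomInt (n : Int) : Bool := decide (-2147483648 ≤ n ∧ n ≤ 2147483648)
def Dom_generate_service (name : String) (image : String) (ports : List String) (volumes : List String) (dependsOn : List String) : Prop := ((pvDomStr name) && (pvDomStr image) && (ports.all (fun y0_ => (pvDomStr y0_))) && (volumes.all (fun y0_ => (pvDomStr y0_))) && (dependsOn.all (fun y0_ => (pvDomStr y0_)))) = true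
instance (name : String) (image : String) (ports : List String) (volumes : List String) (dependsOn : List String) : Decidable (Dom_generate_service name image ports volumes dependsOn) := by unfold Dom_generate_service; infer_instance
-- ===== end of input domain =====

-- B builds a structured document (nested dict, list items pre-quoted) and serializes it with a
-- small generic recursive YAML emitter, instead of A's flat string += with three unrolled blocks.

-- ===== PORT A =====
-- literal transliteration: += string accumulation, three separate if/for blocks
def generate_service (name : String) (image : String) (ports : List String) (volumes : List String) (dependsOn : List String) : String :=
  let indent := "  "
  let service := indent ++ name ++ ":\n" ++ indent ++ indent ++ "image: " ++ image ++ "\n"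
  let service :=
    if ports.isEmpty then service else
      ports.foldl (fun s port => s ++ (indent ++ indent ++ indent) ++ "- \"" ++ port ++ "\"\n")
        (service ++ (indent ++ indent) ++ "ports:\n")
  let service :=
    if volumes.isEmpty then service else
      volumes.foldl (fun s vol => s ++ (indent ++ indent ++ indent) ++ "- " ++ vol ++ "\n")
        (service ++ (indent ++ indent) ++ "volumes:\n")
  let service :=
    if dependsOn.isEmpty then service else
      dependsOn.foldl (fun s dep => s ++ (indent ++ indent ++ indent) ++ "- \"" ++ dep ++ "\"\n")
        (service ++ (indent ++ indent) ++ "depends_on:\n")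
  service

-- ===== PORT B =====
-- document values: a string scalar, a nested mapping, or a list of strings (mutual pair,
-- mirroring the str / dict / list cases _emit distinguishes in Source B)
mutual
inductive PvNode : Type
  | str : String → PvNode
  | dict : PvEntries → PvNode
  | list : List String → PvNode
inductive PvEntries : Type
  | nil : PvEntries
  | cons : String → PvNode → PvEntries → PvEntries
end

-- '  ' * depth
def pvPad (depth : Nat) : String := String.ofList (PySem.List.pyRepeat "  ".toList (depth : Int))

mutual
-- the 'out' list _emit collects over mapping.items()
def pvParts : PvEntries → Nat → List String
  | .nil, _ => []
  | .cons k v rest, depth => pvEntryParts k v depth ++ pvParts rest depth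
-- the lines one (key, val) pair contributes (str / dict / list branches of _emit)
def pvEntryParts : String → PvNode → Nat → List String
  | k, .str s, depth => [pvPad depth ++ k ++ ": " ++ s ++ "\n"]
  | k, .dict d, depth =>
      [pvPad depth ++ k ++ ":\n", PySem.Str.join "" (pvParts d (depth + 1))]
  | k, .list items, depth =>
      if items.isEmpty then [] else
        (pvPad depth ++ k ++ ":\n") :: items.map (fun it => pvPad depth ++ "  - " ++ it ++ "\n")
end

-- _emit: collect the parts, ''.join them
def pvEmit (m : PvEntries) (depth : Nat) : String := PySem.Str.join "" (pvParts m depth)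

def generate_service_alt (name : String) (image : String) (ports : List String) (volumes : List String) (dependsOn : List String) : String :=
  let doc : PvEntries :=
    .cons name (.dict (
      .cons "image" (.str image) (
      .cons "ports" (.list (ports.map (fun p => "\"" ++ p ++ "\""))) (
      .cons "volumes" (.list volumes) (
      .cons "depends_on" (.list (dependsOn.map (fun d => "\"" ++ d ++ "\""))) .nil))))) .nil
  pvEmit doc 1

-- ===== PRECONDITION & SPEC =====
def Spec_generate_service (name : String) (image : String) (ports : List String) (volumes : List String) (dependsOn : List String) (out : String) : Prop := out = generate_service_alt name image ports volumes dependsOn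
instance (name : String) (image : String) (ports : List String) (volumes : List String) (dependsOn : List String) (out : String) : Decidable (Spec_generate_service name image ports volumes dependsOn out) := by unfold Spec_generate_service; infer_instance

-- ===== CLAIM =====
def Claim_equal_generate_service : Prop := ∀ (name : String) (image : String) (ports : List String) (volumes : List String) (dependsOn : List String), Dom_generate_service name image ports volumes dependsOn → Spec_generate_service name image ports volumes dependsOn (generate_service name image ports volumes dependsOn)

-- ===== LEMMAS AND PROOFS =====

-- ''.join with empty separator, at the char-list level, is flatten
theorem chars_join_nil_sep : ∀ (ps : List (List Char)), PySem.Chars.join [] ps = ps.flatten := by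
  intro ps
  induction ps with
  | nil => simp [PySem.Chars.join_nil]
  | cons p rest ih =>
      cases rest with
      | nil => simp [PySem.Chars.join_singleton]
      | cons q r => rw [PySem.Chars.join_cons_cons]; simp [ih]

theorem join_empty_sep (parts : List String) :
    (PySem.Str.join "" parts).toList = (parts.map String.toList).flatten := by
  rw [PySem.Str.toList_join]
  have h : ("" : String).toList = [] := rfl
  rw [h, chars_join_nil_sep]

-- A's += loop over a section, at the char-list level
theorem foldl_section_toList (pre mid post : String) :
    ∀ (l : List String) (init : String),
      (l.foldl (fun s x => s ++ pre ++ mid ++ x ++ post) init).toList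
        = init.toList
            ++ (l.map (fun x => pre.toList ++ mid.toList ++ x.toList ++ post.toList)).flatten := by
  intro l
  induction l with
  | nil => simp
  | cons x xs ih =>
      intro init
      simp only [List.foldl_cons, List.map_cons, List.flatten_cons, ih, String.toList_append]
      simp [List.append_assoc]

-- ===== VERDICT =====
theorem generate_service_spec : Claim_equal_generate_service := by
  intro name image ports volumes dependsOn _
  show _ = _
  apply String.toList_injective
  simp only [generate_service, generate_service_alt, pvEmit, pvParts, pvEntryParts,
    List.append_nil, join_empty_sep, List.isEmpty_map]
  by_cases hp : ports.isEmpty <;> by_cases hv : volumes.isEmpty <;> by_cases hd : dependsOn.isEmpty <;>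
    simp only [hp, hv, hd, if_true, if_false,
      Bool.false_eq_true, foldl_section_toList, String.toList_append, List.map_cons, List.map_nil,
      List.flatten_cons, List.map_map, List.flatten_nil, List.append_nil, pvPad] <;>
    simp [chars_join_nil_sep, Function.comp_def,
      List.append_assoc, PySem.List.pyRepeat]
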